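-- pv_equiv track=rewrite | github.com/KITOS2003/labo_helper | labo-helper/utils.py | unpack_8bit
-- ===== SOURCE A (Python) =====
-- def unpack_8bit(bitfield_8):
--     result = []
--     for i in range(8):
--         if bitfield_8 & 2**i != 0:
--             result.append(True)
--         else:
--             result.append(False)
--     return result
-- ===== SOURCE B (Python) =====
-- def unpack_8bit(bitfield_8):
--     masked = bitfield_8 & 0xFF
--     return [c == '1' for c in format(masked, '08b')[::-1]]
-- ===== Notes on version B (the rewrite author's own statement) =====
-- stated objective: idiomatic
-- what changed: B masks off the low byte once, renders it as a zero-padded binary string, and maps its reversed characters to booleans, instead of looping over bit indices and testing a power-of-two mask per bit.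
import Mathlib
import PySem

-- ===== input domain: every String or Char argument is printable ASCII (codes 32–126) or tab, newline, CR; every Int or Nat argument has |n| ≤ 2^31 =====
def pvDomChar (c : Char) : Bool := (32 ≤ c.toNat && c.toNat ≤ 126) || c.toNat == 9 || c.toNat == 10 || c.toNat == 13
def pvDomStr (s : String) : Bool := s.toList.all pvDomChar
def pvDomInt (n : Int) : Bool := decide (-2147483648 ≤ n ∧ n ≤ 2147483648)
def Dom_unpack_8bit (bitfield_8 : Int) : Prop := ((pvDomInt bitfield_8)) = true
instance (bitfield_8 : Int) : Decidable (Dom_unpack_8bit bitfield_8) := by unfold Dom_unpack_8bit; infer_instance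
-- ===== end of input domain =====

-- B masks off the low byte once, renders it as a zero-padded binary string and maps its
-- reversed characters to booleans, instead of testing a power-of-two mask per bit (idiomatic).

-- ===== PORT A =====
def unpack_8bit (bitfield_8 : Int) : List Bool :=
  (PySem.List.pyRange 0 8 1).foldl
    (fun result i =>
      if PySem.Int.band bitfield_8 (2 ^ i.toNat) ≠ 0 then result ++ [true]
      else result ++ [false])
    []

-- ===== PORT B =====
-- the zero-padded binary format call is ported as PySem.Int.toBinChars (Python's plain
-- binary format) left-padded with '0' to the fixed width; the reversing slice is List.reverse.
def unpack_8bit_alt (bitfield_8 : Int) : List Bool :=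
  let masked := PySem.Int.band bitfield_8 255
  let s := PySem.Int.toBinChars masked
  let padded := List.replicate (8 - s.length) '0' ++ s
  padded.reverse.map (fun c => c == '1')

-- ===== PRECONDITION & SPEC =====
def Spec_unpack_8bit (bitfield_8 : Int) (out : List Bool) : Prop := out = unpack_8bit_alt bitfield_8
instance (bitfield_8 : Int) (out : List Bool) : Decidable (Spec_unpack_8bit bitfield_8 out) := by unfold Spec_unpack_8bit; infer_instance

-- ===== CLAIM (what is proved, stated in full; the proofs are below) =====
def Claim_equal_unpack_8bit : Prop := ∀ (bitfield_8 : Int), Dom_unpack_8bit bitfield_8 → Spec_unpack_8bit bitfield_8 (unpack_8bit bitfield_8)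

-- ===== LEMMAS AND PROOFS =====

-- For i < 8, masking to the low byte does not change bit i (holds for all Int, two's complement).
set_option maxRecDepth 8192 in
theorem pv_byte (r i : Nat) (hr : r < 256) (hi : i < 8) :
    (255 - r) &&& 2 ^ i = 2 ^ i - (2 ^ i &&& r) := by
  have h : ∀ r : Fin 256, ∀ i : Fin 8, (255 - r.val) &&& 2 ^ i.val = 2 ^ i.val - (2 ^ i.val &&& r.val) := by decide
  exact h ⟨r, hr⟩ ⟨i, hi⟩

-- Masking to the low byte does not change bit i < 8 (all Int, two's complement).
theorem pv_band255_two_pow (b : Int) (i : Nat) (hi : i < 8) :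
    PySem.Int.band (PySem.Int.band b 255) (2 ^ i) = PySem.Int.band b (2 ^ i) := by
  have h255 : (255 : Nat) &&& 2 ^ i = 2 ^ i := by
    interval_cases i <;> decide
  rcases b with n | k
  · -- b = ↑n ≥ 0
    simp only [Int.ofNat_eq_natCast]
    have h1 : PySem.Int.band ((n : Nat) : Int) 255 = ((n &&& 255 : Nat) : Int) := by
      simpa using PySem.Int.band_natCast n 255
    have h2 : ((2 : Int) ^ i) = ((2 ^ i : Nat) : Int) := by push_cast; ring
    rw [h1, h2, PySem.Int.band_natCast, PySem.Int.band_natCast, Nat.and_assoc, h255]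
  · -- b = Int.negSucc k : unfold band's definition on a negative first argument
    set m := (2 ^ i : Nat) with hm
    have h2 : ((2 : Int) ^ i) = ((m : Nat) : Int) := by rw [hm]; push_cast; ring
    have hneg : ¬ (0 : Int) ≤ Int.negSucc k := by omega
    have hb255 : PySem.Int.band (Int.negSucc k) 255 = ((255 - (255 &&& k) : Nat) : Int) := by
      simp only [PySem.Int.band, hneg, if_false]
      simp
    have hbm : PySem.Int.band (Int.negSucc k) ((m : Nat) : Int) = ((m - (m &&& k) : Nat) : Int) := by
      simp only [PySem.Int.band, hneg, if_false]
      have h0m : (0 : Int) ≤ ((m : Nat) : Int) := by positivity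
      simp only [h0m, if_true]
      simp
    rw [hb255, h2, hbm, PySem.Int.band_natCast]
    -- now a pure Nat statement about the low byte of k
    congr 1
    have hk255 : (255 : Nat) &&& k = k % 256 := by
      have h := Nat.and_two_pow_sub_one_eq_mod k 8
      rw [Nat.and_comm]
      simpa using h
    have ht : (k % 256).testBit i = k.testBit i := by
      have h := Nat.testBit_mod_two_pow k 8 i
      norm_num at h
      simp [h, hi]
    have hmk : m &&& k = m &&& (k % 256) := by
      rw [hm, Nat.two_pow_and, Nat.two_pow_and, ht]
    rw [hk255, hmk, hm]
    exact pv_byte (k % 256) i (Nat.mod_lt _ (by norm_num)) hi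

-- masked value is a byte
theorem pv_band255_bound (b : Int) : 0 ≤ PySem.Int.band b 255 ∧ PySem.Int.band b 255 < 256 := by
  rcases b with n | k
  · simp only [Int.ofNat_eq_natCast]
    have h1 : PySem.Int.band ((n : Nat) : Int) 255 = ((n &&& 255 : Nat) : Int) := by
      simpa using PySem.Int.band_natCast n 255
    rw [h1]
    have : n &&& 255 ≤ 255 := Nat.and_le_right
    omega
  · have hneg : ¬ (0 : Int) ≤ Int.negSucc k := by omega
    simp only [PySem.Int.band, hneg, if_false]
    norm_num
    have : (255 : Nat) &&& k ≤ 255 := Nat.and_le_left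
    omega

theorem pv_band_self255 (n : Nat) (h : n < 256) : PySem.Int.band ((n : Nat) : Int) 255 = ((n : Nat) : Int) := by
  have h1 : PySem.Int.band ((n : Nat) : Int) 255 = ((n &&& 255 : Nat) : Int) := by
    simpa using PySem.Int.band_natCast n 255
  rw [h1]
  congr 1
  have : n &&& 255 = n % 256 := by simpa using Nat.and_two_pow_sub_one_eq_mod n 8
  omega

-- A depends only on the low byte
theorem pv_A_mask (b : Int) : unpack_8bit b = unpack_8bit (PySem.Int.band b 255) := by
  unfold unpack_8bit
  refine (PySem.List.foldl_congr_mem _ _ _ _ ?_).symm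
  intro acc x hx
  have hx' := (PySem.List.mem_pyRange_one).1 hx
  have h8 : x.toNat < 8 := by omega
  rw [pv_band255_two_pow b x.toNat h8]

-- B depends only on the low byte (trivially, via the idempotent mask)
theorem pv_B_mask (n : Nat) (h : n < 256) (b : Int) (hb : PySem.Int.band b 255 = ((n : Nat) : Int)) :
    unpack_8bit_alt b = unpack_8bit_alt ((n : Nat) : Int) := by
  unfold unpack_8bit_alt
  rw [hb, pv_band_self255 n h]

-- exhaustive byte check
set_option maxRecDepth 8192 in
theorem pv_core : ∀ n : Fin 256, unpack_8bit ((n.val : Nat) : Int) = unpack_8bit_alt ((n.val : Nat) : Int) := by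
  decide

-- ===== VERDICT (by name: the statement is the Claim_ definition above) =====
theorem unpack_8bit_spec : Claim_equal_unpack_8bit := by
  intro b _
  unfold Spec_unpack_8bit
  obtain ⟨h0, h1⟩ := pv_band255_bound b
  obtain ⟨n, hn⟩ : ∃ n : Nat, PySem.Int.band b 255 = ((n : Nat) : Int) :=
    ⟨(PySem.Int.band b 255).toNat, by omega⟩
  have hn256 : n < 256 := by omega
  rw [pv_A_mask b, hn, pv_core ⟨n, hn256⟩, ← pv_B_mask n hn256 b hn]
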